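-- pv_equiv track=rewrite | github.com/asmundg/adventofcode | 2023/src/day_14.py | part1
-- ===== SOURCE A (Python) =====
-- import copy
-- from typing import List, TypeAlias
--
-- Data: TypeAlias = List[List[str]]
--
-- def parse(data: str) -> Data:
--     return [list(line) for line in data.split("\n")]
--
-- def rotate(lines: List[List[str]], n=1):
--     for _ in range(n):
--         lines = [list(t) for t in zip(*reversed(lines))]
--     return lines
--
-- def tilt(lines: Data, direction: str) -> Data:
--     lines = copy.deepcopy(lines)
--
--     rotations = {"E": 3, "S": 2, "W": 1, "N": 0}
--
--     if direction in rotations: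
--         lines = rotate(lines, rotations[direction])
--
--     for y, line in enumerate(lines):
--         for x, char in enumerate(line):
--             if char == "O":
--                 for new_y in range(y, 0, -1):
--                     if lines[new_y - 1][x] != ".":
--                         if new_y != y:
--                             lines[new_y][x] = "O"
--                             lines[y][x] = "."
--                         break
--                 else:
--                     if y != 0:
--                         lines[0][x] = "O"
--                         lines[y][x] = "."
--
--     if direction in rotations:
--         lines = rotate(lines, 4 - rotations[direction])
--
--     return lines
--
-- def part1(data: str) -> int:
--     lines = parse(data)
--
--     lines = tilt(lines, direction="N")
--     total = 0
--     for y, line in enumerate(lines):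
--         for _, char in enumerate(line):
--             total += len(lines) - y if char == "O" else 0
--     return total
-- ===== SOURCE B (Python) =====
-- def part1(data: str) -> int:
--     # One pass per column with a "next free slot" pointer: no grid mutation,
--     # the load is accumulated arithmetically while scanning each column top-down.
--     lines = data.split("\n")
--     H = len(lines)
--     W = 0
--     for line in lines:
--         W = max(W, len(line))
--     total = 0
--     for x in range(W):
--         free = 0
--         for y in range(H):
--             row = lines[y]
--             if x >= len(row):
--                 free = y + 1
--             else:
--                 c = row[x]
--                 if c == "O":
--                     total += H - free
--                     free += 1
--                 elif c != ".":
--                     free = y + 1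
--     return total
-- ===== Notes on version B (the rewrite author's own statement) =====
-- stated objective: faster
-- what changed: B replaces A's deepcopy + per-rock upward re-scan over a mutated grid (plus the rotate-by-4 round trip) with a single top-down pass per column that tracks the next free slot and accumulates the weighted load arithmetically; Pre_ excludes ragged inputs containing a rock, on which A either raises IndexError or returns a load distorted by rotate's zip-truncation of ragged rows.
-- outside the precondition, e.g. on part1('OO\nO'): A returns 3, B returns 5; on part1('O\n..'): A returns 2, B returns 2
import Mathlib
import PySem

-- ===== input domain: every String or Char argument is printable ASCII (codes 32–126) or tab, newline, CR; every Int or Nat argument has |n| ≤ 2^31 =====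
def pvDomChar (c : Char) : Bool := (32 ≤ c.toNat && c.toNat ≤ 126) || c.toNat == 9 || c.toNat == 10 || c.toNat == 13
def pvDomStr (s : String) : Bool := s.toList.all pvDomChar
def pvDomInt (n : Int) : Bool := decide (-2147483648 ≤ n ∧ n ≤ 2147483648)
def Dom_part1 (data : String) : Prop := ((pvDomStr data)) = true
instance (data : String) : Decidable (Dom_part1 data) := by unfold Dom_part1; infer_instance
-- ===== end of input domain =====

-- B tilts each column in one pass with a next-free-slot pointer and sums the load directly,
-- instead of A's per-rock upward re-scan over a mutated grid plus four grid rotations.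

-- ===== PORT A =====
-- parse: [list(line) for line in data.split("\n")]
def parseA (data : String) : List (List Char) :=
  PySem.Chars.splitOn data.toList ['\n']

-- one step of rotate: [list(t) for t in zip(*reversed(lines))]
-- (zip(*rows) is the min-length transpose: result length = min of the row lengths; exact)
def rot1 (g : List (List Char)) : List (List Char) :=
  match g with
  | [] => []
  | r :: rs =>
    let w := rs.foldl (fun m row => min m row.length) r.length
    (List.range w).map (fun i => (r :: rs).reverse.map (fun row => row.getD i ' '))

-- rotate(lines, n): n successive single rotations
def rotN (g : List (List Char)) : Nat → List (List Char)
  | 0 => g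
  | n + 1 => rotN (rot1 g) n

-- lines[y][x] read / write (in range on every input Pre_ admits and the loops reach)
def pget (g : List (List Char)) (y x : Nat) : Char := (g.getD y []).getD x '.'
def pset (g : List (List Char)) (y x : Nat) (c : Char) : List (List Char) :=
  g.set y ((g.getD y []).set x c)

-- 'for new_y in range(y, 0, -1): … else: …' (fuel = current new_y; 0 = loop exhausted)
def scanUp (g : List (List Char)) (y x : Nat) : Nat → List (List Char)
  | 0 => if y ≠ 0 then pset (pset g 0 x 'O') y x '.' else g
  | m + 1 =>
    if pget g m x ≠ '.' then
      (if m + 1 ≠ y then pset (pset g (m + 1) x 'O') y x '.' else g)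
    else scanUp g y x m

def tiltCell (g : List (List Char)) (y x : Nat) : List (List Char) :=
  if pget g y x = 'O' then scanUp g y x y else g

-- the two nested 'for' loops of tilt
def tiltLoop (g : List (List Char)) : List (List Char) :=
  (List.range g.length).foldl
    (fun h y => (List.range ((h.getD y []).length)).foldl (fun h2 x => tiltCell h2 y x) h) g

def tiltA (g : List (List Char)) (direction : String) : List (List Char) :=
  let rotations : PySem.Dict String Int :=
    PySem.Dict.ofList [("E", 3), ("S", 2), ("W", 1), ("N", 0)]
  let g1 := if (PySem.Dict.get? rotations direction).isSome
            then rotN g (PySem.Dict.getD rotations direction 0).toNat else g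
  let g2 := tiltLoop g1
  if (PySem.Dict.get? rotations direction).isSome
  then rotN g2 (4 - (PySem.Dict.getD rotations direction 0).toNat) else g2

-- the final summation loop of part1
def sumLoad (g : List (List Char)) : Int :=
  (List.range g.length).foldl
    (fun total y =>
      (List.range ((g.getD y []).length)).foldl
        (fun t x => t + (if pget g y x = 'O' then (g.length : Int) - (y : Int) else 0)) total)
    0

def part1 (data : String) : Int := sumLoad (tiltA (parseA data) "N")

-- ===== PORT B =====
def part1_alt (data : String) : Int :=
  let lines := PySem.Chars.splitOn data.toList ['\n']
  let H := lines.length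
  let W := lines.foldl (fun m l => max m l.length) 0
  (List.range W).foldl
    (fun total x =>
      ((List.range H).foldl
        (fun (st : Nat × Int) y =>
          let row := lines.getD y []
          if row.length ≤ x then (y + 1, st.2)
          else
            let c := row.getD x ' '
            if c = 'O' then (st.1 + 1, st.2 + ((H : Int) - (st.1 : Int)))
            else if c ≠ '.' then (y + 1, st.2)
            else st)
        (0, total)).2)
    0

-- ===== PRECONDITION & SPEC =====
-- Pre_ admits rectangular inputs (all lines of equal length) and inputs without rocks.
-- It excludes ragged inputs that contain a rock: on those A's upward scan may index a row
-- that has no cell in the rock's column and raise IndexError, and where A does return, its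
-- final rotate-by-4 truncates the ragged grid to the shortest row (Python zip semantics),
-- so no single intended value exists there; B computes the untruncated load.
def Pre_part1 (data : String) : Prop :=
  (∀ l ∈ PySem.Chars.splitOn data.toList ['\n'],
      l.length = ((PySem.Chars.splitOn data.toList ['\n']).getD 0 []).length)
  ∨ (∀ l ∈ PySem.Chars.splitOn data.toList ['\n'], 'O' ∉ l)
instance (data : String) : Decidable (Pre_part1 data) := by unfold Pre_part1; infer_instance

def pvWitness_part1 : String := "O.\n.#"

def Spec_part1 (data : String) (out : Int) : Prop := out = part1_alt data
instance (data : String) (out : Int) : Decidable (Spec_part1 data out) := by unfold Spec_part1; infer_instance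

-- ===== CLAIM (what is proved, stated in full; the proofs are below) =====
def Claim_equal_part1 : Prop := ∀ (data : String), Dom_part1 data → Pre_part1 data → Spec_part1 data (part1 data)

-- ===== LEMMAS AND PROOFS =====

-- ---------- proof-side notions ----------

-- rectangular grid: every row has length W
def Rect (g : List (List Char)) (W : Nat) : Prop := ∀ r ∈ g, r.length = W

-- no rock anywhere
def NoO (g : List (List Char)) : Prop := ∀ r ∈ g, 'O' ∉ r

-- column x of a grid
def colOf (g : List (List Char)) (x : Nat) : List Char := g.map (fun r => r.getD x '.')

-- 1-D image of scanUp on a single column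
def scan1 (c : List Char) (y : Nat) : Nat → List Char
  | 0 => if y ≠ 0 then (c.set 0 'O').set y '.' else c
  | m + 1 =>
    if c.getD m '.' ≠ '.' then
      (if m + 1 ≠ y then (c.set (m + 1) 'O').set y '.' else c)
    else scan1 c y m

-- 1-D image of tiltCell
def step1 (c : List Char) (y : Nat) : List Char :=
  if c.getD y '.' = 'O' then scan1 c y y else c

-- 1-D image of B's inner loop step (state = (free, total))
def bstep (H : Nat) (c : List Char) (st : Nat × Int) (y : Nat) : Nat × Int :=
  if c.getD y '.' = 'O' then (st.1 + 1, st.2 + ((H : Int) - (st.1 : Int)))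
  else if c.getD y '.' ≠ '.' then (y + 1, st.2) else st

def colB (c : List Char) (H k : Nat) : Nat × Int := (List.range k).foldl (bstep H c) (0, 0)

def aCol (c : List Char) (k : Nat) : List Char := (List.range k).foldl step1 c

-- partial load of the first k cells of a column
def pload (d : List Char) (H k : Nat) : Int :=
  ∑ y ∈ Finset.range k, (if d.getD y '.' = 'O' then (H : Int) - (y : Int) else 0)

-- the body of part1_alt on an already-split grid
def bMain (lines : List (List Char)) : Int :=
  let H := lines.length
  let W := lines.foldl (fun m l => max m l.length) 0
  (List.range W).foldl
    (fun total x =>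
      ((List.range H).foldl
        (fun (st : Nat × Int) y =>
          let row := lines.getD y []
          if row.length ≤ x then (y + 1, st.2)
          else
            let c := row.getD x ' '
            if c = 'O' then (st.1 + 1, st.2 + ((H : Int) - (st.1 : Int)))
            else if c ≠ '.' then (y + 1, st.2)
            else st)
        (0, total)).2)
    0

theorem part1_alt_eq (data : String) :
    part1_alt data = bMain (PySem.Chars.splitOn data.toList ['\n']) := rfl

theorem tiltA_N (g : List (List Char)) : tiltA g "N" = rotN (tiltLoop g) 4 := rfl

-- ---------- basic list facts ----------

theorem sum_list_range (n : Nat) (f : Nat → Int) :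
    ((List.range n).map f).sum = ∑ i ∈ Finset.range n, f i := by
  simp [Finset.range, Multiset.range]

theorem foldl_id_of {α β : Type} (l : List α) (f : β → α → β) (a : β)
    (h : ∀ x ∈ l, f a x = a) : l.foldl f a = a := by
  induction l with
  | nil => rfl
  | cons x xs ih =>
    simp only [List.foldl_cons, h x (by simp)]
    exact ih (fun x hx => h x (by simp [hx]))

theorem getD_cases {α : Type} (l : List α) (n : Nat) (d : α) :
    l.getD n d = d ∨ l.getD n d ∈ l := by
  by_cases h : n < l.length
  · right; rw [List.getD_eq_getElem _ _ h]; exact List.getElem_mem h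
  · left
    rw [List.getD_eq_getElem?_getD, List.getElem?_eq_none (by omega : l.length ≤ n)]
    rfl

theorem rect_rowlen {g : List (List Char)} {W : Nat} (h : Rect g W) {y : Nat}
    (hy : y < g.length) : (g.getD y []).length = W := by
  rw [List.getD_eq_getElem _ _ hy]; exact h _ (List.getElem_mem hy)

theorem rect_iff (g : List (List Char)) (W : Nat) :
    Rect g W ↔ ∀ y < g.length, (g.getD y []).length = W := by
  constructor
  · intro h y hy; exact rect_rowlen h hy
  · intro h r hr
    obtain ⟨i, hi, rfl⟩ := List.mem_iff_getElem.1 hr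
    have := h i hi
    rwa [List.getD_eq_getElem _ _ hi] at this

-- ---------- pset / colOf ----------

theorem len_pset (g : List (List Char)) (y x : Nat) (c : Char) :
    (pset g y x c).length = g.length := List.length_set

theorem rowlen_pset (g : List (List Char)) (y x : Nat) (c : Char) (y' : Nat) :
    ((pset g y x c).getD y' []).length = ((g.getD y' []).length) := by
  unfold pset
  simp only [List.getD_eq_getElem?_getD, List.getElem?_set]
  by_cases h : y = y'
  · subst h
    by_cases hy : y < g.length
    · simp [hy]
    · simp [hy]
  · simp [h]

theorem colOf_length (g : List (List Char)) (x : Nat) : (colOf g x).length = g.length := by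
  simp [colOf]

theorem colOf_getD (g : List (List Char)) (x y : Nat) :
    (colOf g x).getD y '.' = (g.getD y []).getD x '.' := by
  by_cases hy : y < g.length
  · rw [List.getD_eq_getElem _ _ (by simpa [colOf_length] using hy),
      List.getD_eq_getElem g _ hy]
    simp [colOf]
  · have h1 : g.length ≤ y := by omega
    have hg : g.getD y [] = [] := by
      rw [List.getD_eq_getElem?_getD, List.getElem?_eq_none h1]; rfl
    rw [hg, List.getD_eq_getElem?_getD, List.getElem?_eq_none (by simpa [colOf] using h1)]
    rfl

theorem pget_eq_colOf (g : List (List Char)) (y x : Nat) :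
    pget g y x = (colOf g x).getD y '.' := (colOf_getD g x y).symm

theorem colOf_pset_self (g : List (List Char)) {y x : Nat} (c : Char)
    (hx : x < (g.getD y []).length) :
    colOf (pset g y x c) x = (colOf g x).set y c := by
  unfold pset colOf
  rw [List.map_set]
  congr 1
  rw [List.getD_eq_getElem _ _ (by simpa using hx)]
  simp

theorem colOf_pset_ne (g : List (List Char)) (y : Nat) (c : Char) {x x' : Nat}
    (hne : x' ≠ x) : colOf (pset g y x c) x' = colOf g x' := by
  unfold pset colOf
  rw [List.map_set]
  have hval : ((g.getD y []).set x c).getD x' '.' = (g.getD y []).getD x' '.' := by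
    simp [List.getD_eq_getElem?_getD, List.getElem?_set_ne (fun h => hne h.symm)]
  rw [hval]
  by_cases hy : y < g.length
  · have hy' : y < (g.map (fun r => r.getD x' '.')).length := by simpa using hy
    have : (g.getD y []).getD x' '.' = (g.map (fun r => r.getD x' '.'))[y] := by
      rw [List.getD_eq_getElem g _ hy]; simp
    rw [this, List.set_getElem_self]
  · rw [List.set_eq_of_length_le (by simpa using (by omega : g.length ≤ y))]

-- ---------- scanUp / tiltCell project to columns ----------

theorem scanUp_spec {g : List (List Char)} {W : Nat} (hR : Rect g W) {x y : Nat}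
    (hx : x < W) (hy : y < g.length) :
    ∀ n, n ≤ y →
      colOf (scanUp g y x n) x = scan1 (colOf g x) y n
      ∧ (∀ x', x' ≠ x → colOf (scanUp g y x n) x' = colOf g x')
      ∧ (scanUp g y x n).length = g.length
      ∧ (∀ y', ((scanUp g y x n).getD y' []).length = (g.getD y' []).length) := by
  intro n
  induction n with
  | zero =>
    intro _
    by_cases h0 : y ≠ 0
    · have hx0 : x < (g.getD 0 []).length := by
        rw [rect_rowlen hR (by omega)]; exact hx
      have hxy : x < ((pset g 0 x 'O').getD y []).length := by
        rw [rowlen_pset, rect_rowlen hR hy]; exact hx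
      refine ⟨?_, ?_, ?_, ?_⟩
      · simp only [scanUp, scan1, if_pos h0]
        rw [colOf_pset_self _ _ hxy, colOf_pset_self _ _ hx0]
      · intro x' hx'
        simp only [scanUp, if_pos h0]
        rw [colOf_pset_ne _ _ _ hx', colOf_pset_ne _ _ _ hx']
      · simp only [scanUp, if_pos h0, len_pset]
      · intro y'; simp only [scanUp, if_pos h0, rowlen_pset]
    · have e : scanUp g y x 0 = g := by simp only [scanUp, if_neg h0]
      have e2 : scan1 (colOf g x) y 0 = colOf g x := by simp only [scan1, if_neg h0]
      rw [e, e2]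
      exact ⟨rfl, fun _ _ => rfl, rfl, fun _ => rfl⟩
  | succ m ih =>
    intro hn
    have hguard : (pget g m x ≠ '.') ↔ ((colOf g x).getD m '.' ≠ '.') := by
      rw [pget_eq_colOf]
    by_cases hg : pget g m x ≠ '.'
    · have hg' : (colOf g x).getD m '.' ≠ '.' := hguard.1 hg
      by_cases hmy : m + 1 ≠ y
      · have hxm : x < (g.getD (m+1) []).length := by
          rw [rect_rowlen hR (by omega)]; exact hx
        have hxy : x < ((pset g (m+1) x 'O').getD y []).length := by
          rw [rowlen_pset, rect_rowlen hR hy]; exact hx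
        refine ⟨?_, ?_, ?_, ?_⟩
        · simp only [scanUp, scan1, if_pos hg, if_pos hg', if_pos hmy]
          rw [colOf_pset_self _ _ hxy, colOf_pset_self _ _ hxm]
        · intro x' hx'
          simp only [scanUp, if_pos hg, if_pos hmy]
          rw [colOf_pset_ne _ _ _ hx', colOf_pset_ne _ _ _ hx']
        · simp only [scanUp, if_pos hg, if_pos hmy, len_pset]
        · intro y'; simp only [scanUp, if_pos hg, if_pos hmy, rowlen_pset]
      · have e : scanUp g y x (m+1) = g := by simp only [scanUp, if_pos hg, if_neg hmy]
        have e2 : scan1 (colOf g x) y (m+1) = colOf g x := by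
          simp only [scan1, if_pos hg', if_neg hmy]
        rw [e, e2]
        exact ⟨rfl, fun _ _ => rfl, rfl, fun _ => rfl⟩
    · have hg' : ¬ ((colOf g x).getD m '.' ≠ '.') := fun h => hg (hguard.2 h)
      have := ih (by omega)
      simp only [scanUp, scan1, if_neg hg, if_neg hg']
      exact this

theorem tiltCell_spec {g : List (List Char)} {W : Nat} (hR : Rect g W) {x y : Nat}
    (hx : x < W) (hy : y < g.length) :
    colOf (tiltCell g y x) x = step1 (colOf g x) y
    ∧ (∀ x', x' ≠ x → colOf (tiltCell g y x) x' = colOf g x')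
    ∧ (tiltCell g y x).length = g.length
    ∧ Rect (tiltCell g y x) W := by
  have hguard : (pget g y x = 'O') ↔ ((colOf g x).getD y '.' = 'O') := by
    rw [pget_eq_colOf]
  by_cases hO : pget g y x = 'O'
  · have hO' := hguard.1 hO
    obtain ⟨h1, h2, h3, h4⟩ := scanUp_spec hR hx hy y le_rfl
    refine ⟨?_, ?_, ?_, ?_⟩
    · simp only [tiltCell, step1, if_pos hO, if_pos hO']; exact h1
    · intro x' hx'; simp only [tiltCell, if_pos hO]; exact h2 x' hx'
    · simp only [tiltCell, if_pos hO]; exact h3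
    · simp only [tiltCell, if_pos hO]
      rw [rect_iff]
      intro y' hy'
      rw [h4 y']
      exact rect_rowlen hR (by omega)
  · have hO' : ¬ ((colOf g x).getD y '.' = 'O') := fun h => hO (hguard.2 h)
    have e : tiltCell g y x = g := by simp only [tiltCell, if_neg hO]
    have e2 : step1 (colOf g x) y = colOf g x := by simp only [step1, if_neg hO']
    rw [e, e2]
    exact ⟨rfl, fun _ _ => rfl, rfl, hR⟩

-- ---------- one row pass, then the whole tilt loop ----------

theorem rowPass_spec {W : Nat} :
    ∀ (xs : List Nat) (g : List (List Char)), xs.Nodup → (∀ x ∈ xs, x < W) →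
      Rect g W → ∀ y, y < g.length →
      (∀ x, colOf (xs.foldl (fun h x => tiltCell h y x) g) x =
          (if x ∈ xs then step1 (colOf g x) y else colOf g x))
      ∧ (xs.foldl (fun h x => tiltCell h y x) g).length = g.length
      ∧ Rect (xs.foldl (fun h x => tiltCell h y x) g) W := by
  intro xs
  induction xs with
  | nil => intro g _ _ hR y _; exact ⟨fun x => by simp, rfl, hR⟩
  | cons x0 xs ih =>
    intro g hnd hlt hR y hy
    have hx0 : x0 < W := hlt x0 (by simp)
    obtain ⟨c1, c2, c3, c4⟩ := tiltCell_spec hR hx0 hy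
    have hnd' : xs.Nodup := (List.nodup_cons.1 hnd).2
    have hx0n : x0 ∉ xs := (List.nodup_cons.1 hnd).1
    obtain ⟨i1, i2, i3⟩ := ih (tiltCell g y x0) hnd' (fun x hx => hlt x (by simp [hx]))
      c4 y (by omega)
    refine ⟨?_, by simp only [List.foldl_cons]; omega, by simpa only [List.foldl_cons] using i3⟩
    intro x
    simp only [List.foldl_cons]
    rw [i1 x]
    by_cases hmem : x ∈ xs
    · have hne : x ≠ x0 := fun h => hx0n (h ▸ hmem)
      simp [hmem, c2 x hne, List.mem_cons]
    · by_cases hx0' : x = x0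
      · subst hx0'; simp [hmem, c1]
      · simp [hmem, hx0', c2 x hx0']

theorem tiltLoop_aux {W H : Nat} :
    ∀ (ys : List Nat) (g : List (List Char)), Rect g W → g.length = H →
      (∀ y ∈ ys, y < H) →
      (∀ x, x < W →
        colOf (ys.foldl (fun h y =>
            (List.range ((h.getD y []).length)).foldl (fun h2 x => tiltCell h2 y x) h) g) x
          = ys.foldl step1 (colOf g x))
      ∧ (ys.foldl (fun h y =>
            (List.range ((h.getD y []).length)).foldl (fun h2 x => tiltCell h2 y x) h) g).length = H
      ∧ Rect (ys.foldl (fun h y =>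
            (List.range ((h.getD y []).length)).foldl (fun h2 x => tiltCell h2 y x) h) g) W := by
  intro ys
  induction ys with
  | nil => intro g hR hlen _; exact ⟨fun _ _ => rfl, hlen, hR⟩
  | cons y ys ih =>
    intro g hR hlen hmem
    have hyH : y < H := hmem y (by simp)
    have hrow : (g.getD y []).length = W := rect_rowlen hR (by omega)
    obtain ⟨r1, r2, r3⟩ := rowPass_spec (List.range W) g (List.nodup_range)
      (fun x hx => List.mem_range.1 hx) hR y (by omega)
    obtain ⟨j1, j2, j3⟩ := ih ((List.range W).foldl (fun h2 x => tiltCell h2 y x) g) r3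
      (by omega) (fun y' hy' => hmem y' (by simp [hy']))
    refine ⟨?_, ?_, ?_⟩
    · intro x hx
      simp only [List.foldl_cons, hrow]
      rw [j1 x hx, r1 x, if_pos (List.mem_range.2 hx)]
    · simpa only [List.foldl_cons, hrow] using j2
    · simpa only [List.foldl_cons, hrow] using j3

theorem tiltLoop_spec {g : List (List Char)} {W : Nat} (hR : Rect g W) :
    (∀ x, x < W → colOf (tiltLoop g) x = aCol (colOf g x) g.length)
    ∧ (tiltLoop g).length = g.length ∧ Rect (tiltLoop g) W := by
  obtain ⟨h1, h2, h3⟩ := tiltLoop_aux (W := W) (H := g.length) (List.range g.length) g hR rfl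
    (fun y hy => List.mem_range.1 hy)
  exact ⟨fun x hx => h1 x hx, h2, h3⟩

-- ---------- rotations: four rotations are the identity on a rectangular grid ----------

theorem minfold (W : Nat) : ∀ (rs : List (List Char)), (∀ r ∈ rs, r.length = W) →
    rs.foldl (fun m row => min m row.length) W = W := by
  intro rs
  induction rs with
  | nil => intro _; rfl
  | cons r rs ih =>
    intro h
    simp only [List.foldl_cons, h r (by simp), min_self]
    exact ih (fun r' hr' => h r' (by simp [hr']))

theorem rot1_eq {g : List (List Char)} {W : Nat} (hR : Rect g W) (hg : g ≠ []) :
    rot1 g = (List.range W).map (fun i => g.reverse.map (fun row => row.getD i ' ')) := by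
  cases g with
  | nil => exact absurd rfl hg
  | cons r rs =>
    show (List.range (rs.foldl (fun m row => min m row.length) r.length)).map _ = _
    have hr : r.length = W := hR r (by simp)
    rw [hr, minfold W rs (fun r' hr' => hR r' (by simp [hr']))]

theorem rect_rot1 {g : List (List Char)} {W : Nat} (hR : Rect g W) (hg : g ≠ []) :
    (rot1 g).length = W ∧ Rect (rot1 g) g.length := by
  rw [rot1_eq hR hg]
  constructor
  · simp
  · intro r hr
    obtain ⟨i, _, rfl⟩ := List.mem_map.1 hr
    simp

theorem transpose2 {g : List (List Char)} {W : Nat} (hR : Rect g W) (hg : g ≠ []) :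
    (List.range g.length).map (fun j =>
        ((List.range W).map (fun i => g.reverse.map (fun row => row.getD i ' '))).reverse.map
          (fun row => row.getD j ' '))
      = g.reverse.map List.reverse := by
  have hH : 0 < g.length := List.length_pos_iff.2 hg
  apply List.ext_getElem?
  intro j
  rw [List.getElem?_map, List.getElem?_map]
  by_cases hj : j < g.length
  · rw [List.getElem?_range hj, List.getElem?_reverse (by simpa using hj),
      List.getElem?_eq_getElem (by omega : g.length - 1 - j < g.length)]
    simp only [Option.map_some]
    congr 1
    have hW2 : (g[g.length - 1 - j]'(by omega)).length = W := hR _ (List.getElem_mem _)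
    apply List.ext_getElem?
    intro k
    rw [List.getElem?_map]
    by_cases hk : k < W
    · rw [List.getElem?_reverse (by simpa using hk)]
      rw [List.length_map, List.length_range]
      rw [List.getElem?_map, List.getElem?_range (by omega : W - 1 - k < W)]
      simp only [Option.map_some]
      rw [List.getElem?_reverse (by rw [hW2]; exact hk), hW2,
        List.getElem?_eq_getElem (by rw [hW2]; omega : W - 1 - k < _)]
      congr 1
      rw [List.getD_eq_getElem?_getD, List.getElem?_map,
        List.getElem?_reverse (by simpa using hj),
        List.getElem?_eq_getElem (by omega : g.length - 1 - j < g.length)]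
      simp only [Option.map_some, Option.getD_some]
      rw [List.getD_eq_getElem _ _ (by rw [hW2]; omega)]
    · have hk1 : (((List.range W).map (fun i => g.reverse.map (fun row => row.getD i ' '))).reverse).length ≤ k := by
        simp; omega
      have hk2 : ((g[g.length - 1 - j]'(by omega)).reverse).length ≤ k := by
        simp [hW2]; omega
      rw [List.getElem?_eq_none hk1, List.getElem?_eq_none hk2]
      rfl
  · rw [List.getElem?_eq_none (by simp; omega),
      List.getElem?_eq_none (by simp; omega : (g.reverse).length ≤ j)]
    rfl

theorem rot2_eq {g : List (List Char)} {W : Nat} (hR : Rect g W) (hg : g ≠ [])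
    (hW : 0 < W) : rot1 (rot1 g) = g.reverse.map List.reverse := by
  obtain ⟨hl1, hR1⟩ := rect_rot1 hR hg
  have hg1 : rot1 g ≠ [] := by
    intro h; rw [h] at hl1; simp at hl1; omega
  rw [rot1_eq hR1 hg1, rot1_eq hR hg]
  exact transpose2 hR hg

theorem rev2_invol (g : List (List Char)) :
    (g.reverse.map List.reverse).reverse.map List.reverse = g := by
  simp [List.map_reverse, List.map_map]

theorem rect_rev2 {g : List (List Char)} {W : Nat} (hR : Rect g W) :
    Rect (g.reverse.map List.reverse) W := by
  intro r hr
  obtain ⟨r', hr', rfl⟩ := List.mem_map.1 hr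
  simp [hR r' (List.mem_reverse.1 hr')]

theorem rot4_eq {g : List (List Char)} {W : Nat} (hR : Rect g W) (hg : g ≠ [])
    (hW : 0 < W) : rotN g 4 = g := by
  show rotN (rot1 g) 3 = g
  show rotN (rot1 (rot1 g)) 2 = g
  show rotN (rot1 (rot1 (rot1 g))) 1 = g
  show rot1 (rot1 (rot1 (rot1 g))) = g
  rw [rot2_eq hR hg hW]
  have hg2 : g.reverse.map List.reverse ≠ [] := by
    intro h
    have hlen : g.length = 0 := by simpa using congrArg List.length h
    exact hg (List.length_eq_zero_iff.mp hlen)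
  rw [rot2_eq (rect_rev2 hR) hg2 hW, rev2_invol]

theorem rot1_rect0 {g : List (List Char)} (hR : Rect g 0) (hg : g ≠ []) :
    rot1 g = [] := by
  rw [rot1_eq hR hg]
  simp

theorem rot4_rect0 {g : List (List Char)} (hR : Rect g 0) (hg : g ≠ []) :
    rotN g 4 = [] := by
  show rotN (rot1 g) 3 = []
  rw [rot1_rect0 hR hg]
  rfl

-- ---------- the two summations as Finset sums over columns ----------

theorem sumLoad_eq {g : List (List Char)} {W : Nat} (hR : Rect g W) :
    sumLoad g = ∑ x ∈ Finset.range W, pload (colOf g x) g.length g.length := by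
  unfold sumLoad
  have hstep : ∀ (total : Int), ∀ y ∈ List.range g.length,
      (List.range ((g.getD y []).length)).foldl
        (fun t x => t + (if pget g y x = 'O' then (g.length : Int) - (y : Int) else 0)) total
      = total + ((List.range W).map
          (fun x => if pget g y x = 'O' then (g.length : Int) - (y : Int) else 0)).sum := by
    intro total y hy
    rw [rect_rowlen hR (List.mem_range.1 hy),
      PySem.List.foldl_add (List.range W)
        (fun x => if pget g y x = 'O' then (g.length : Int) - (y : Int) else 0) total]
  rw [PySem.List.foldl_congr_mem (List.range g.length) _
      (fun total y => total + ((List.range W).map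
        (fun x => if pget g y x = 'O' then (g.length : Int) - (y : Int) else 0)).sum) 0
      (fun acc x hx => hstep acc x hx),
    PySem.List.foldl_add (List.range g.length)
      (fun y => ((List.range W).map
        (fun x => if pget g y x = 'O' then (g.length : Int) - (y : Int) else 0)).sum) 0]
  rw [zero_add, sum_list_range]
  have : ∀ y, ((List.range W).map
      (fun x => if pget g y x = 'O' then (g.length : Int) - (y : Int) else 0)).sum
      = ∑ x ∈ Finset.range W, (if pget g y x = 'O' then (g.length : Int) - (y : Int) else 0) :=
    fun y => sum_list_range W _
  simp only [this]
  rw [Finset.sum_comm]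
  apply Finset.sum_congr rfl
  intro x _
  unfold pload
  apply Finset.sum_congr rfl
  intro y _
  rw [pget_eq_colOf]

theorem maxfold (W : Nat) : ∀ (rs : List (List Char)), rs ≠ [] →
    (∀ r ∈ rs, r.length = W) → ∀ a, rs.foldl (fun m l => max m l.length) a = max a W := by
  intro rs
  induction rs with
  | nil => intro h; exact absurd rfl h
  | cons r rs ih =>
    intro _ h a
    cases rs with
    | nil => simp [h r (by simp)]
    | cons r' rs' =>
      have e : (r :: r' :: rs').foldl (fun m l => max m l.length) a
          = (r' :: rs').foldl (fun m l => max m l.length) (max a r.length) := rfl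
      rw [e, h r (by simp), ih (by simp) (fun r'' hr'' => h r'' (by simp [hr''])) (max a W)]
      omega

-- B's inner fold only ever adds to the running total
theorem bshift (H : Nat) (c : List Char) :
    ∀ (ys : List Nat) (f0 : Nat) (t0 : Int),
      ys.foldl (bstep H c) (f0, t0)
        = ((ys.foldl (bstep H c) (f0, 0)).1, t0 + (ys.foldl (bstep H c) (f0, 0)).2) := by
  intro ys
  induction ys with
  | nil => intro f0 t0; simp
  | cons y ys ih =>
    intro f0 t0
    simp only [List.foldl_cons]
    by_cases hO : c.getD y '.' = 'O'
    · have e1 : bstep H c (f0, t0) y = (f0 + 1, t0 + ((H : Int) - (f0 : Int))) := by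
        unfold bstep; rw [if_pos hO]
      have e2 : bstep H c (f0, 0) y = (f0 + 1, 0 + ((H : Int) - (f0 : Int))) := by
        unfold bstep; rw [if_pos hO]
      rw [e1, e2, ih (f0 + 1) (t0 + ((H : Int) - (f0 : Int))),
        ih (f0 + 1) (0 + ((H : Int) - (f0 : Int)))]
      simp only [Prod.mk.injEq]
      exact ⟨trivial, by ring⟩
    · by_cases hd : c.getD y '.' ≠ '.'
      · have e1 : bstep H c (f0, t0) y = (y + 1, t0) := by
          unfold bstep; rw [if_neg hO, if_pos hd]
        have e2 : bstep H c (f0, 0) y = (y + 1, 0) := by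
          unfold bstep; rw [if_neg hO, if_pos hd]
        rw [e1, e2, ih (y + 1) t0, ih (y + 1) 0]
      · have e1 : bstep H c (f0, t0) y = (f0, t0) := by
          unfold bstep; rw [if_neg hO, if_neg hd]
        have e2 : bstep H c (f0, 0) y = (f0, 0) := by
          unfold bstep; rw [if_neg hO, if_neg hd]
        rw [e1, e2, ih f0 t0, ih f0 0]

theorem bMain_eq {L : List (List Char)} {W : Nat} (hR : Rect L W) (hL : L ≠ []) :
    bMain L = ∑ x ∈ Finset.range W, (colB (colOf L x) L.length L.length).2 := by
  unfold bMain
  rw [maxfold W L hL hR 0]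
  have hmax : max 0 W = W := by omega
  rw [hmax]
  have hinner : ∀ (total : Int), ∀ x ∈ List.range W,
      ((List.range L.length).foldl
        (fun (st : Nat × Int) y =>
          let row := L.getD y []
          if row.length ≤ x then (y + 1, st.2)
          else
            let c := row.getD x ' '
            if c = 'O' then (st.1 + 1, st.2 + ((L.length : Int) - (st.1 : Int)))
            else if c ≠ '.' then (y + 1, st.2)
            else st)
        (0, total)).2
      = total + (colB (colOf L x) L.length L.length).2 := by
    intro total x hx
    have hxW : x < W := List.mem_range.1 hx
    have hcongr : (List.range L.length).foldl
        (fun (st : Nat × Int) y =>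
          let row := L.getD y []
          if row.length ≤ x then (y + 1, st.2)
          else
            let c := row.getD x ' '
            if c = 'O' then (st.1 + 1, st.2 + ((L.length : Int) - (st.1 : Int)))
            else if c ≠ '.' then (y + 1, st.2)
            else st)
        (0, total)
        = (List.range L.length).foldl (bstep L.length (colOf L x)) (0, total) := by
      apply PySem.List.foldl_congr_mem
      intro st y hy
      have hyH : y < L.length := List.mem_range.1 hy
      have hrow : (L.getD y []).length = W := rect_rowlen hR hyH
      have hnot : ¬ ((L.getD y []).length ≤ x) := by omega
      have hc : (L.getD y []).getD x ' ' = (colOf L x).getD y '.' := by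
        rw [colOf_getD, List.getD_eq_getElem _ _ (by omega : x < (L.getD y []).length),
          List.getD_eq_getElem _ _ (by omega : x < (L.getD y []).length)]
      simp only [if_neg hnot, hc, bstep]
    rw [hcongr, bshift L.length (colOf L x) (List.range L.length) 0 total]
    rfl
  rw [PySem.List.foldl_congr_mem (List.range W) _
      (fun total x => total + (colB (colOf L x) L.length L.length).2) 0
      (fun acc x hx => hinner acc x hx),
    PySem.List.foldl_add (List.range W)
      (fun x => (colB (colOf L x) L.length L.length).2) 0,
    zero_add, sum_list_range]

-- ---------- the 1-D theorem: A's column tilt has B's load ----------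

theorem getD_set_ne' (l : List Char) {i j : Nat} (a : Char) (h : i ≠ j) :
    (l.set i a).getD j '.' = l.getD j '.' := by
  simp [List.getD_eq_getElem?_getD, List.getElem?_set_ne h]

theorem getD_set_self' (l : List Char) {i : Nat} (a : Char) (h : i < l.length) :
    (l.set i a).getD i '.' = a := by
  simp [List.getD_eq_getElem?_getD, List.getElem?_set_self h]

theorem scan1_run (d : List Char) (k f : Nat)
    (hgap : ∀ i, f ≤ i → i < k → d.getD i '.' = '.')
    (hb : f = 0 ∨ d.getD (f - 1) '.' ≠ '.') :
    ∀ n, f ≤ n → n ≤ k → scan1 d k n = (if f = k then d else (d.set f 'O').set k '.') := by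
  intro n
  induction n with
  | zero =>
    intro hf _
    have hf0 : f = 0 := by omega
    subst hf0
    by_cases hk : k ≠ 0
    · simp only [scan1, if_pos hk, if_neg (by omega : ¬ (0 : Nat) = k)]
    · simp only [scan1, if_neg hk, if_pos (by omega : (0 : Nat) = k)]
  | succ m ih =>
    intro hf hn
    by_cases hfm : f ≤ m
    · have hm : ¬ (d.getD m '.' ≠ '.') := by
        simp only [ne_eq, not_not]; exact hgap m hfm (by omega)
      simp only [scan1, if_neg hm]
      exact ih hfm (by omega)
    · have hfe : f = m + 1 := by omega
      have hbne : d.getD m '.' ≠ '.' := by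
        rcases hb with h | h
        · omega
        · have : f - 1 = m := by omega
          rwa [this] at h
      by_cases hmk : m + 1 ≠ k
      · simp only [scan1, if_pos hbne, if_pos hmk, if_neg (by omega : ¬ f = k)]
        rw [hfe]
      · simp only [scan1, if_pos hbne, if_neg hmk, if_pos (by omega : f = k)]

theorem oneD (c : List Char) (H : Nat) (hc : c.length = H) :
    ∀ k, k ≤ H →
      ((List.range k).foldl step1 c).length = H
      ∧ (∀ i, k ≤ i → ((List.range k).foldl step1 c).getD i '.' = c.getD i '.')
      ∧ (∀ i, ((List.range k).foldl (bstep H c) ((0 : Nat), (0 : Int))).1 ≤ i → i < k →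
            ((List.range k).foldl step1 c).getD i '.' = '.')
      ∧ (((List.range k).foldl (bstep H c) (0, 0)).1 = 0
          ∨ ((List.range k).foldl step1 c).getD
              (((List.range k).foldl (bstep H c) (0, 0)).1 - 1) '.' ≠ '.')
      ∧ ((List.range k).foldl (bstep H c) (0, 0)).1 ≤ k
      ∧ pload ((List.range k).foldl step1 c) H k
          = ((List.range k).foldl (bstep H c) (0, 0)).2 := by
  intro k
  induction k with
  | zero =>
    intro _
    refine ⟨by simpa using hc, fun i _ => rfl, fun i h1 h2 => by omega, Or.inl rfl, le_rfl, ?_⟩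
    simp [pload]
  | succ k ih =>
    intro hk1
    obtain ⟨ih1, ih2, ih3, ih4, ih5, ih6⟩ := ih (by omega)
    have hdsucc : (List.range (k+1)).foldl step1 c
        = step1 ((List.range k).foldl step1 c) k := by
      rw [List.range_succ, List.foldl_append]; rfl
    have hbsucc : (List.range (k+1)).foldl (bstep H c) ((0 : Nat), (0 : Int))
        = bstep H c ((List.range k).foldl (bstep H c) (0, 0)) k := by
      rw [List.range_succ, List.foldl_append]; rfl
    set d := (List.range k).foldl step1 c with hd
    set st := (List.range k).foldl (bstep H c) ((0 : Nat), (0 : Int)) with hst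
    have hdk : d.getD k '.' = c.getD k '.' := ih2 k le_rfl
    have hkH : k < H := by omega
    by_cases hO : c.getD k '.' = 'O'
    · -- a rock: it rolls to position st.1
      have hstep : step1 d k = (if st.1 = k then d else (d.set st.1 'O').set k '.') := by
        unfold step1
        rw [hdk, if_pos hO]
        exact scan1_run d k st.1 ih3 ih4 k ih5 le_rfl
      have hbs : bstep H c st k = (st.1 + 1, st.2 + ((H : Int) - (st.1 : Int))) := by
        unfold bstep; rw [if_pos hO]
      rw [hdsucc, hbsucc, hstep, hbs]
      by_cases hfk : st.1 = k
      · -- the rock is already in place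
        rw [if_pos hfk]
        refine ⟨ih1, fun i hi => ih2 i (by omega), ?_, ?_, by omega, ?_⟩
        · intro i h1 h2; omega
        · right
          have : st.1 + 1 - 1 = k := by omega
          rw [this, hdk, hO]; simp
        · unfold pload
          rw [Finset.sum_range_succ]
          have : d.getD k '.' = 'O' := by rw [hdk]; exact hO
          rw [if_pos this]
          unfold pload at ih6
          rw [ih6, hfk]
      · -- the rock moves up to st.1 < k
        have hfk' : st.1 < k := by omega
        rw [if_neg hfk]
        have hlen : ((d.set st.1 'O').set k '.').length = H := by simp [ih1]
        refine ⟨hlen, ?_, ?_, ?_, by omega, ?_⟩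
        · intro i hi
          rw [getD_set_ne' _ '.' (by omega), getD_set_ne' _ 'O' (by omega)]
          exact ih2 i (by omega)
        · intro i h1 h2
          by_cases hik : i = k
          · subst hik
            exact getD_set_self' _ '.' (by simp [ih1]; omega)
          · rw [getD_set_ne' _ '.' (fun h => hik h.symm),
              getD_set_ne' _ 'O' (by simp at h1 ⊢; omega)]
            exact ih3 i (by simp at h1; omega) (by omega)
        · right
          have : st.1 + 1 - 1 = st.1 := by omega
          rw [this, getD_set_ne' _ '.' (by omega),
            getD_set_self' _ 'O' (by simp [ih1]; omega)]
          simp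
        · unfold pload
          rw [Finset.sum_range_succ]
          have hk0 : ((d.set st.1 'O').set k '.').getD k '.' = '.' :=
            getD_set_self' _ '.' (by simp [ih1]; omega)
          rw [hk0, if_neg (by simp)]
          have hsum : ∀ y ∈ Finset.range k,
              (if ((d.set st.1 'O').set k '.').getD y '.' = 'O'
                then (H : Int) - (y : Int) else 0)
              = (if d.getD y '.' = 'O' then (H : Int) - (y : Int) else 0)
                + (if y = st.1 then (H : Int) - (st.1 : Int) else 0) := by
            intro y hy
            have hyk : y < k := Finset.mem_range.1 hy
            by_cases hyf : y = st.1
            · subst hyf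
              rw [getD_set_ne' _ '.' (by omega), getD_set_self' _ 'O' (by rw [ih1]; omega),
                if_pos rfl, if_pos rfl]
              have : d.getD st.1 '.' = '.' := ih3 st.1 le_rfl hyk
              rw [this, if_neg (by simp)]
              simp
            · rw [getD_set_ne' _ '.' (by omega), getD_set_ne' _ 'O' (fun h => hyf h.symm),
                if_neg hyf]
              simp
          rw [Finset.sum_congr rfl hsum, Finset.sum_add_distrib]
          unfold pload at ih6
          rw [ih6]
          rw [Finset.sum_ite_eq' (Finset.range k) st.1 (fun _ => (H : Int) - (st.1 : Int)),
            if_pos (Finset.mem_range.2 hfk')]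
          ring
    · -- no rock at row k
      have hstep : step1 d k = d := by
        unfold step1; rw [hdk, if_neg hO]
      by_cases hdot : c.getD k '.' = '.'
      · have hbs : bstep H c st k = st := by
          unfold bstep; rw [if_neg hO, if_neg (not_not_intro hdot)]
        rw [hdsucc, hbsucc, hstep, hbs]
        refine ⟨ih1, fun i hi => ih2 i (by omega), ?_, ih4, by omega, ?_⟩
        · intro i h1 h2
          by_cases hik : i = k
          · subst hik; rw [hdk]; exact hdot
          · exact ih3 i h1 (by omega)
        · unfold pload
          rw [Finset.sum_range_succ]
          have : d.getD k '.' ≠ 'O' := by rw [hdk]; exact hO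
          rw [if_neg this, add_zero]
          exact ih6
      · -- a blocker
        have hbs : bstep H c st k = (k + 1, st.2) := by
          unfold bstep
          rw [if_neg hO, if_pos hdot]
        rw [hdsucc, hbsucc, hstep, hbs]
        refine ⟨ih1, fun i hi => ih2 i (by omega), ?_, ?_, by omega, ?_⟩
        · intro i h1 h2; simp at h1; omega
        · right
          have : k + 1 - 1 = k := by omega
          rw [this, hdk]; exact hdot
        · unfold pload
          rw [Finset.sum_range_succ]
          have : d.getD k '.' ≠ 'O' := by rw [hdk]; exact hO
          rw [if_neg this, add_zero]
          exact ih6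

theorem oneD_main (c : List Char) (H : Nat) (hc : c.length = H) :
    pload (aCol c H) H H = (colB c H H).2 := by
  obtain ⟨_, _, _, _, _, h6⟩ := oneD c H hc H le_rfl
  exact h6

-- ---------- the no-rock case ----------

theorem getD_ne_O {l : List Char} (h : 'O' ∉ l) {i : Nat} {d : Char} (hd : d ≠ 'O') :
    l.getD i d ≠ 'O' := by
  rcases getD_cases l i d with he | hm
  · rw [he]; exact hd
  · intro hc; rw [hc] at hm; exact h hm

theorem noO_pget {g : List (List Char)} (h : NoO g) (y x : Nat) : pget g y x ≠ 'O' := by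
  unfold pget
  rcases getD_cases g y [] with he | hm
  · rw [he]; simp
  · exact getD_ne_O (h _ hm) (by decide)

theorem tiltLoop_noO {g : List (List Char)} (h : NoO g) : tiltLoop g = g := by
  unfold tiltLoop
  apply foldl_id_of
  intro y _
  apply foldl_id_of
  intro x _
  unfold tiltCell
  rw [if_neg (noO_pget h y x)]

theorem rot1_noO {g : List (List Char)} (h : NoO g) : NoO (rot1 g) := by
  cases g with
  | nil => intro r hr; simp [rot1] at hr
  | cons r0 rs =>
    intro r hr
    obtain ⟨i, _, rfl⟩ := List.mem_map.1 hr
    intro hO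
    obtain ⟨row, hrow, hval⟩ := List.mem_map.1 hO
    exact getD_ne_O (h row (List.mem_reverse.1 hrow)) (by decide) hval

theorem rotN_noO : ∀ (n : Nat) (g : List (List Char)), NoO g → NoO (rotN g n) := by
  intro n
  induction n with
  | zero => intro g h; exact h
  | succ m ih => intro g h; exact ih (rot1 g) (rot1_noO h)

theorem sumLoad_noO {g : List (List Char)} (h : NoO g) : sumLoad g = 0 := by
  unfold sumLoad
  apply foldl_id_of
  intro y _
  apply foldl_id_of
  intro x _
  rw [if_neg (noO_pget h y x), add_zero]

theorem bMain_noO {L : List (List Char)} (h : NoO L) : bMain L = 0 := by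
  unfold bMain
  apply foldl_id_of
  intro x _
  have h2 : ∀ (ys : List Nat) (st : Nat × Int),
      (ys.foldl (fun (st : Nat × Int) y =>
        let row := L.getD y []
        if row.length ≤ x then (y + 1, st.2)
        else
          let c := row.getD x ' '
          if c = 'O' then (st.1 + 1, st.2 + ((L.length : Int) - (st.1 : Int)))
          else if c ≠ '.' then (y + 1, st.2)
          else st) st).2 = st.2 := by
    intro ys
    induction ys with
    | nil => intro st; rfl
    | cons y ys ihy =>
      intro st
      rw [List.foldl_cons]
      by_cases hlen : (L.getD y []).length ≤ x
      · rw [show (let row := L.getD y []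
          if row.length ≤ x then (y + 1, st.2)
          else
            let c := row.getD x ' '
            if c = 'O' then (st.1 + 1, st.2 + ((L.length : Int) - (st.1 : Int)))
            else if c ≠ '.' then (y + 1, st.2)
            else st) = (y + 1, st.2) from by simp only [if_pos hlen]]
        exact ihy (y + 1, st.2)
      · have hrow : L.getD y [] ∈ L := by
          rcases getD_cases L y [] with he | hm
          · rw [he] at hlen; simp at hlen
          · exact hm
        have hcO : (L.getD y []).getD x ' ' ≠ 'O' := getD_ne_O (h _ hrow) (by decide)
        by_cases hdot : (L.getD y []).getD x ' ' ≠ '.'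
        · rw [show (let row := L.getD y []
            if row.length ≤ x then (y + 1, st.2)
            else
              let c := row.getD x ' '
              if c = 'O' then (st.1 + 1, st.2 + ((L.length : Int) - (st.1 : Int)))
              else if c ≠ '.' then (y + 1, st.2)
              else st) = (y + 1, st.2) from by
            simp only [if_neg hlen, if_neg hcO, if_pos hdot]]
          exact ihy (y + 1, st.2)
        · rw [show (let row := L.getD y []
            if row.length ≤ x then (y + 1, st.2)
            else
              let c := row.getD x ' '
              if c = 'O' then (st.1 + 1, st.2 + ((L.length : Int) - (st.1 : Int)))
              else if c ≠ '.' then (y + 1, st.2)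
              else st) = st from by
            simp only [if_neg hlen, if_neg hcO, if_neg hdot]]
          exact ihy st
  exact h2 (List.range L.length) (0, 0)

-- ---------- assembly ----------

theorem main_rect {L : List (List Char)} {W : Nat} (hR : Rect L W) :
    sumLoad (tiltA L "N") = bMain L := by
  by_cases hL : L = []
  · subst hL; rfl
  · have hH : 0 < L.length := List.length_pos_iff.2 hL
    obtain ⟨t1, t2, t3⟩ := tiltLoop_spec hR
    rw [tiltA_N]
    have hTne : tiltLoop L ≠ [] := by
      intro hh; rw [hh] at t2; simp at t2; omega
    by_cases hW : W = 0
    · subst hW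
      rw [rot4_rect0 t3 hTne]
      rw [show sumLoad ([] : List (List Char)) = 0 from rfl, bMain_eq hR hL]
      simp
    · have hW' : 0 < W := by omega
      rw [rot4_eq t3 hTne hW', sumLoad_eq t3, bMain_eq hR hL, t2]
      apply Finset.sum_congr rfl
      intro x hx
      rw [t1 x (Finset.mem_range.1 hx)]
      exact oneD_main (colOf L x) L.length (colOf_length L x)

theorem main_noO {L : List (List Char)} (h : NoO L) : sumLoad (tiltA L "N") = bMain L := by
  rw [tiltA_N, tiltLoop_noO h, sumLoad_noO (rotN_noO 4 L h), bMain_noO h]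

-- ===== VERDICT (by name: the statement is the Claim_ definition above) =====
theorem part1_spec : Claim_equal_part1 := by
  intro data _ hPre
  unfold Spec_part1
  show part1 data = part1_alt data
  rw [part1_alt_eq]
  unfold part1 parseA
  rcases hPre with hrect | hno
  · exact main_rect (fun r hr => hrect r hr)
  · exact main_noO (fun r hr => hno r hr)
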